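-- pv_equiv track=rewrite | github.com/lzy0505/tp-skills | lean4-theorem-proving/scripts/sorry_analyzer.py | extract_documentation
-- ===== SOURCE A (Python) =====
-- from typing import List, Optional
--
-- def extract_documentation(lines: List[str], sorry_idx: int) -> List[str]:
--     """Extract TODO/NOTE comments near the sorry"""
--     docs = []
--     # Check lines after sorry
--     for i in range(sorry_idx + 1, min(len(lines), sorry_idx + 10)):
--         line = lines[i].strip()
--         if line.startswith('--'):
--             comment = line[2:].strip()
--             if any(keyword in comment.upper() for keyword in ['TODO', 'NOTE', 'FIXME', 'STRATEGY', 'DEPENDENCIES']):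
--                 docs.append(comment)
--         elif line and not line.startswith('--'):
--             break
--     return docs
-- ===== SOURCE B (Python) =====
-- def extract_documentation(lines, sorry_idx):
--     """Reverse traversal: walk the candidate window back-to-front, prepending
--     keyword comments and resetting the accumulator to [] whenever a non-blank
--     non-comment line (a stop line) is seen; no break / early exit needed."""
--     keywords = ('TODO', 'NOTE', 'FIXME', 'STRATEGY', 'DEPENDENCIES')
--     acc = []
--     for raw in reversed(lines[sorry_idx + 1:min(len(lines), sorry_idx + 10)]):
--         line = raw.strip()
--         if line.startswith('--'):
--             body = line[2:].strip()
--             if any(k in body.upper() for k in keywords):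
--                 acc = [body] + acc
--         elif line:
--             acc = []
--     return acc
-- ===== Notes on version B (the rewrite author's own statement) =====
-- stated objective: alternative
-- what changed: B traverses the candidate window in REVERSE, building the result back-to-front by prepending keyword comments and resetting the accumulator to [] at each stop line, instead of A's forward index loop with an early break.
-- outside the precondition, e.g. on extract_documentation(['-- TODO x'], -2): A returns ['TODO x', 'TODO x'], B returns ['TODO x']
import Mathlib
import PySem

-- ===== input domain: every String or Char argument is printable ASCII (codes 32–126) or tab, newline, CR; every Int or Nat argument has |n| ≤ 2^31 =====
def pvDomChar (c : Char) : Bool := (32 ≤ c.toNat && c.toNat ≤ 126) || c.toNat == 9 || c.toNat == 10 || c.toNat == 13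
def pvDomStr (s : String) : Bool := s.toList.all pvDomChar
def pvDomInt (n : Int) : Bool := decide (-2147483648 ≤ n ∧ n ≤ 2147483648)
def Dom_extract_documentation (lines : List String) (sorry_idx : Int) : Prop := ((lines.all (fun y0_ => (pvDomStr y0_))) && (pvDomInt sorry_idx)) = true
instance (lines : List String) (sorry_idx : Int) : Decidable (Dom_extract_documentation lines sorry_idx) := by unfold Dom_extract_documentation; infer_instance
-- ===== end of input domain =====

-- B walks the window in reverse, prepending keyword comments and resetting on stop lines, instead of A's forward break loop (alternative traversal order, same cost).


-- shared literal helper: any(keyword in comment.upper() for keyword in [...])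
def pvKw (comment : String) : Bool :=
  ["TODO", "NOTE", "FIXME", "STRATEGY", "DEPENDENCIES"].any
    (fun k => PySem.Str.isIn k (PySem.Str.upper comment))

-- ===== PORT A =====
-- the break-driven loop over range(sorry_idx+1, min(len(lines), sorry_idx+10)); pyGet? none = IndexError (excluded by Pre_)
def pvGoA (lines : List String) : List Int → List String → List String
  | [], docs => docs
  | i :: rest, docs =>
    match PySem.List.pyGet? lines i with
    | none => docs
    | some raw =>
      let line := PySem.Str.strip raw
      if PySem.Str.startswith line "--" then
        let comment := PySem.Str.strip (PySem.Str.slice line (some 2) none)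
        if pvKw comment then pvGoA lines rest (docs ++ [comment])
        else pvGoA lines rest docs
      else if !(line == "") && !(PySem.Str.startswith line "--") then docs
      else pvGoA lines rest docs

def extract_documentation (lines : List String) (sorry_idx : Int) : List String :=
  pvGoA lines (PySem.List.pyRange (sorry_idx + 1) (min (lines.length : Int) (sorry_idx + 10)) 1) []

-- ===== PORT B =====
-- the body of B's reversed-window for loop: prepend keyword comments, reset to [] on a stop line
def pvStepB (acc : List String) (raw : String) : List String :=
  let line := PySem.Str.strip raw
  if PySem.Str.startswith line "--" then
    let body := PySem.Str.strip (PySem.Str.slice line (some 2) none)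
    if pvKw body then body :: acc else acc
  else if !(line == "") then [] else acc

def extract_documentation_alt (lines : List String) (sorry_idx : Int) : List String :=
  ((PySem.List.slice lines (some (sorry_idx + 1))
      (some (min (lines.length : Int) (sorry_idx + 10)))).reverse).foldl pvStepB []

-- ===== PRECONDITION & SPEC =====
-- Pre_ requires sorry_idx ≥ -1 (every scanned index is then a plain nonnegative line index): for sorry_idx < -1
-- A raises IndexError on most inputs and otherwise re-reads lines through Python's negative-index wraparound,
-- while B's slice semantics give the plain window there.
def Pre_extract_documentation (lines : List String) (sorry_idx : Int) : Prop := -1 ≤ sorry_idx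
instance (lines : List String) (sorry_idx : Int) : Decidable (Pre_extract_documentation lines sorry_idx) := by unfold Pre_extract_documentation; infer_instance

def pvWitness_extract_documentation : List String × Int := (["theorem foo : True := by", "  sorry", "-- TODO: prove it", "", "-- NOTE: easy", "def x := 1"], 1)

def Spec_extract_documentation (lines : List String) (sorry_idx : Int) (out : List String) : Prop := out = extract_documentation_alt lines sorry_idx
instance (lines : List String) (sorry_idx : Int) (out : List String) : Decidable (Spec_extract_documentation lines sorry_idx out) := by unfold Spec_extract_documentation; infer_instance

-- ===== CLAIM (what is proved, stated in full; the proofs are below) =====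
def Claim_equal_extract_documentation : Prop := ∀ (lines : List String) (sorry_idx : Int), Dom_extract_documentation lines sorry_idx → Pre_extract_documentation lines sorry_idx → Spec_extract_documentation lines sorry_idx (extract_documentation lines sorry_idx)

-- ===== LEMMAS AND PROOFS =====

-- A's loop body replayed over a plain window of unstripped lines
def pvLoop : List String → List String → List String
  | [], docs => docs
  | w :: rest, docs =>
    let line := PySem.Str.strip w
    if PySem.Str.startswith line "--" then
      let comment := PySem.Str.strip (PySem.Str.slice line (some 2) none)
      if pvKw comment then pvLoop rest (docs ++ [comment])
      else pvLoop rest docs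
    else if !(line == "") && !(PySem.Str.startswith line "--") then docs
    else pvLoop rest docs

-- A's forward break loop equals B's right-fold (reversed-traversal) over the same window
theorem pvLoop_eq_foldr (ws : List String) (docs : List String) :
    pvLoop ws docs = docs ++ ws.foldr (fun w acc => pvStepB acc w) [] := by
  induction ws generalizing docs with
  | nil => simp [pvLoop]
  | cons w rest ih =>
    simp only [pvLoop, List.foldr_cons]
    by_cases hs : PySem.Str.startswith (PySem.Str.strip w) "--" = true
    · by_cases hk : pvKw (PySem.Str.strip (PySem.Str.slice (PySem.Str.strip w) (some 2) none)) = true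
      · have hstep : ∀ acc, pvStepB acc w
            = PySem.Str.strip (PySem.Str.slice (PySem.Str.strip w) (some 2) none) :: acc := by
          intro acc; simp only [pvStepB]; rw [if_pos hs, if_pos hk]
        rw [if_pos hs, if_pos hk, hstep, ih]; simp
      · have hstep : ∀ acc, pvStepB acc w = acc := by
          intro acc; simp only [pvStepB]; rw [if_pos hs, if_neg hk]
        rw [if_pos hs, if_neg hk, hstep, ih]
    · have hsF : PySem.Str.startswith (PySem.Str.strip w) "--" = false := by simpa using hs
      by_cases he : (PySem.Str.strip w == "") = true
      · have hstep : ∀ acc, pvStepB acc w = acc := by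
          intro acc; simp only [pvStepB]; rw [if_neg hs]; simp [he]
        have hcond : (!(PySem.Str.strip w == "") && !(PySem.Str.startswith (PySem.Str.strip w) "--")) = false := by
          simp [he]
        rw [if_neg hs, hstep, hcond, ih]
        simp
      · have heF : (PySem.Str.strip w == "") = false := by simpa using he
        have hstep : ∀ acc, pvStepB acc w = [] := by
          intro acc; simp only [pvStepB]; rw [if_neg hs]; simp [heF]
        have hcond : (!(PySem.Str.strip w == "") && !(PySem.Str.startswith (PySem.Str.strip w) "--")) = true := by
          simp [heF]
          simpa using hsF
        rw [if_neg hs, hstep, hcond]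
        simp

-- the range-indexing loop reads exactly the window slice
theorem pvGoA_eq_pvLoop (lines : List String) (e : Int) (he : e ≤ (lines.length : Int)) :
    ∀ (n : Nat) (a : Int), 0 ≤ a → (e - a).toNat = n → ∀ docs,
      pvGoA lines (PySem.List.pyRange a e 1) docs
        = pvLoop ((lines.drop a.toNat).take n) docs := by
  intro n
  induction n with
  | zero =>
    intro a ha hn docs
    rw [PySem.List.pyRange_one_eq_nil (by omega)]
    simp [pvGoA, pvLoop]
  | succ m ih =>
    intro a ha hn docs
    have hae : a < e := by omega
    have hlt : a.toNat < lines.length := by omega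
    rw [PySem.List.pyRange_one_cons hae]
    have hget : PySem.List.pyGet? lines a = some lines[a.toNat] :=
      PySem.List.pyGet?_eq_some_getElem lines ha (by omega)
    have hdrop : lines.drop a.toNat = lines[a.toNat] :: lines.drop (a.toNat + 1) := by
      rw [List.drop_eq_getElem_cons hlt]
    have hrec := ih (a + 1) (by omega) (by omega)
    have hnat : (a + 1).toNat = a.toNat + 1 := by omega
    rw [hnat] at hrec
    rw [hdrop]
    simp only [pvGoA, pvLoop, hget, List.take_succ_cons, hrec]

-- ===== VERDICT (by name: the statement is the Claim_ definition above) =====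
theorem extract_documentation_spec : Claim_equal_extract_documentation := by
  intro lines sorry_idx _ hpre
  have hpre' : (-1:Int) ≤ sorry_idx := hpre
  have he : min (lines.length : Int) (sorry_idx + 10) ≤ (lines.length : Int) := min_le_left _ _
  have hlen : (0:Int) ≤ (lines.length : Int) := Int.natCast_nonneg _
  have he0 : (0:Int) ≤ min (lines.length : Int) (sorry_idx + 10) := by omega
  unfold Spec_extract_documentation extract_documentation extract_documentation_alt
  rw [List.foldl_reverse, PySem.List.slice_toNat lines (by omega) he0]
  rw [pvGoA_eq_pvLoop lines _ he ((min (lines.length : Int) (sorry_idx + 10) - (sorry_idx + 1)).toNat)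
      (sorry_idx + 1) (by omega) rfl []]
  rw [pvLoop_eq_foldr, List.nil_append]
  rw [show (min (lines.length : Int) (sorry_idx + 10)).toNat - (sorry_idx + 1).toNat
        = (min (lines.length : Int) (sorry_idx + 10) - (sorry_idx + 1)).toNat from by omega]
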